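-- pv_equiv track=rewrite | github.com/MaratYangurov/Python-CheckIO | List but not the least/Zigzag Array.py | create_zigzag
-- ===== SOURCE A (Python) =====
-- def create_zigzag(rows: int, cols: int, start: int = 1) -> list[list[int]]:
--     # your code here
--     result = [] # Создали первичный список
--     for row in range(0, rows): # Идем циклом по количествам строк rows
--         row_list = []  # Создали вторичный список
--         for col in range(0, cols): # Идем циклом по количествам колонок cols - они же тупо значения
--             row_list.append(start) # Добавляем во вторичный список значиния начиная от start, ровно столько сколько = cols
--             start += 1 # Двигаем счетчик
--         result.append(row_list) # Добавили в первичный список вторичные внутри цикла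
--     u = [] # Создали финальный список
--     for i in range(len(result)): # идем по количесве вложенных списков в списке result
--         if i % 2 == 0: # Если число четное
--             u.append(result[i]) # Добавляем просто вложенный список
--         else: # Если число не четное
--             u.append(result[i][::-1])# Добавляем вложенный список вывирнув наизнанку значения
--     return u
-- ===== SOURCE B (Python) =====
-- def create_zigzag(rows: int, cols: int, start: int = 1) -> list[list[int]]:
--     # Every cell is computed directly from its coordinates (i, j): the value at
--     # row i, column j is start + i*cols + (j on even rows, cols-1-j on odd rows).
--     # No counter is threaded through and nothing is ever reversed.
--     return [
--         [start + i * cols + (cols - 1 - j if i % 2 else j) for j in range(cols)]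
--         for i in range(rows)
--     ]
-- ===== Notes on version B (the rewrite author's own statement) =====
-- stated objective: simpler
-- what changed: B computes each cell independently by a closed-form coordinate formula (value at (i,j) is start + i*cols + (j or cols-1-j by row parity)), eliminating A's mutated running counter, the intermediate grid, and the entire second reversal pass; no list is ever reversed.
import Mathlib
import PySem

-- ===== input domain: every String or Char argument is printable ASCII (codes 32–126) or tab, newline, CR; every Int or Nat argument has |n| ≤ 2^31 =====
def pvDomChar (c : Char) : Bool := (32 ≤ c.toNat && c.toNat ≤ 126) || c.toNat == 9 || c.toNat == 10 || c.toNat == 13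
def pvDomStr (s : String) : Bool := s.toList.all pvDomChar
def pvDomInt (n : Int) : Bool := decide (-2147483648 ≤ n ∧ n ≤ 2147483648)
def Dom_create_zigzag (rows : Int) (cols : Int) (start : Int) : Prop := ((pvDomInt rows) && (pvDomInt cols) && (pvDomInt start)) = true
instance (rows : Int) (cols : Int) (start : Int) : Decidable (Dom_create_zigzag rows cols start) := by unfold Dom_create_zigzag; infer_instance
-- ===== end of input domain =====

-- B computes every cell directly from its coordinates by a closed-form formula, with no running counter, no intermediate grid and no reversal pass.

-- ===== PORT A =====
-- A: fill sequentially with a mutated counter, then a second pass reversing odd-indexed rows.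
def create_zigzag (rows : Int) (cols : Int) (start : Int) : List (List Int) :=
  let st :=
    (PySem.List.pyRange 0 rows 1).foldl
      (fun (acc : List (List Int) × Int) _ =>
        let inner :=
          (PySem.List.pyRange 0 cols 1).foldl
            (fun (a : List Int × Int) _ => (a.1 ++ [a.2], a.2 + 1)) ([], acc.2)
        (acc.1 ++ [inner.1], inner.2))
      ([], start)
  let result := st.1
  (PySem.List.pyRange 0 (result.length : Int) 1).foldl
    (fun u i =>
      if PySem.Int.mod i 2 = 0 then u ++ [PySem.List.pyGetD result i []]
      else u ++ [(PySem.List.pyGetD result i []).reverse])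
    []

-- ===== PORT B =====
-- B: nested comprehension; the cell at (i, j) is start + i*cols + (j on even rows, cols-1-j on odd rows).
def create_zigzag_alt (rows : Int) (cols : Int) (start : Int) : List (List Int) :=
  (PySem.List.pyRange 0 rows 1).map (fun i =>
    (PySem.List.pyRange 0 cols 1).map (fun j =>
      start + i * cols + (if PySem.Int.mod i 2 ≠ 0 then cols - 1 - j else j)))

-- ===== PRECONDITION & SPEC =====
def Spec_create_zigzag (rows : Int) (cols : Int) (start : Int) (out : List (List Int)) : Prop := out = create_zigzag_alt rows cols start
instance (rows : Int) (cols : Int) (start : Int) (out : List (List Int)) : Decidable (Spec_create_zigzag rows cols start out) := by unfold Spec_create_zigzag; infer_instance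

-- ===== CLAIM (what is proved, stated in full; the proofs are below) =====
def Claim_equal_create_zigzag : Prop := ∀ (rows : Int) (cols : Int) (start : Int), Dom_create_zigzag rows cols start → Spec_create_zigzag rows cols start (create_zigzag rows cols start)

-- ===== LEMMAS AND PROOFS =====

-- A's inner loop builds the consecutive run starting at the counter and advances the counter by the run length.
lemma innerFold (L : List Int) : ∀ (l : List Int) (s : Int),
    L.foldl (fun (a : List Int × Int) _ => (a.1 ++ [a.2], a.2 + 1)) (l, s)
      = (l ++ PySem.List.pyRange s (s + L.length) 1, s + L.length) := by
  induction L with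
  | nil => intro l s; simp
  | cons x L ih =>
      intro l s
      simp only [List.foldl_cons, ih, List.length_cons]
      push_cast
      rw [show s + ((L.length : Int) + 1) = s + 1 + (L.length : Int) from by ring,
        PySem.List.pyRange_one_cons (by omega : s < s + 1 + (L.length : Int))]
      simp

-- A's outer loop after the inner loop is summarised: rows are consecutive runs of
-- length cols.toNat starting at start + k * cols.toNat.
lemma outerFold (C : Int) (L : List Int) : ∀ (res : List (List Int)) (s : Int),
    L.foldl
      (fun (acc : List (List Int) × Int) _ =>
        (acc.1 ++ [PySem.List.pyRange acc.2 (acc.2 + C) 1], acc.2 + C))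
      (res, s)
      = (res ++ (List.range L.length).map
            (fun (k : Nat) => PySem.List.pyRange (s + (k : Int) * C) (s + (k : Int) * C + C) 1),
         s + (L.length : Int) * C) := by
  induction L with
  | nil => intro res s; simp
  | cons x L ih =>
      intro res s
      rw [List.foldl_cons]
      show L.foldl _ (res ++ [PySem.List.pyRange s (s + C) 1], s + C) = _
      rw [ih]
      simp only [List.length_cons]
      rw [Prod.mk.injEq]
      refine ⟨?_, by push_cast; ring⟩
      rw [List.range_succ_eq_map, List.map_cons, List.map_map, List.append_assoc,
        List.singleton_append]
      have hmap : List.map ((fun (k : Nat) => PySem.List.pyRange (s + (k : Int) * C)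
            (s + (k : Int) * C + C) 1) ∘ Nat.succ) (List.range L.length)
          = List.map (fun (k : Nat) => PySem.List.pyRange (s + C + (k : Int) * C)
            (s + C + (k : Int) * C + C) 1) (List.range L.length) := by
        apply List.map_congr_left
        intro k _
        simp only [Function.comp_apply]
        congr 1 <;> push_cast <;> ring
      rw [hmap]
      simp

-- A consecutive run as a shifted copy of range(c): used for A's even rows.
lemma fwd_run (a c : Int) :
    PySem.List.pyRange a (a + c) 1 = (PySem.List.pyRange 0 c 1).map (fun j => a + j) := by
  rw [PySem.List.pyRange_one, PySem.List.pyRange_one, List.map_map,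
    show a + c - a = c from by ring, show c - 0 = c from by ring]
  apply List.map_congr_left
  intro k _
  simp [Function.comp]

-- The reverse of a consecutive run as a descending closed form: used for A's odd rows.
lemma rev_run (a c : Int) :
    (PySem.List.pyRange a (a + c) 1).reverse
      = (PySem.List.pyRange 0 c 1).map (fun j => a + (c - 1 - j)) := by
  have h := PySem.List.pyRange_neg_one_eq_reverse (a + c - 1) (a - 1)
  rw [show a - 1 + 1 = a from by ring, show a + c - 1 + 1 = a + c from by ring] at h
  rw [← h, PySem.List.pyRange_neg_one, PySem.List.pyRange_one, List.map_map]
  have : (a + c - 1 - (a - 1)) = c := by ring_nf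
  rw [this, show c - 0 = c from by ring]
  apply List.map_congr_left
  intro k _
  simp [Function.comp]
  omega

-- Per-row agreement: A's row k (a run, reversed when k is odd) equals B's per-cell formula row.
lemma row_eq (cols start : Int) (k : Nat) :
    (if PySem.Int.mod (k : Int) 2 = 0
      then PySem.List.pyRange (start + (k : Int) * (cols.toNat : Int))
        (start + (k : Int) * (cols.toNat : Int) + (cols.toNat : Int)) 1
      else (PySem.List.pyRange (start + (k : Int) * (cols.toNat : Int))
        (start + (k : Int) * (cols.toNat : Int) + (cols.toNat : Int)) 1).reverse)
    = (PySem.List.pyRange 0 cols 1).map (fun j =>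
        start + (k : Int) * cols + (if PySem.Int.mod (k : Int) 2 ≠ 0 then cols - 1 - j else j)) := by
  have hrow : PySem.List.pyRange (start + (k : Int) * (cols.toNat : Int))
        (start + (k : Int) * (cols.toNat : Int) + (cols.toNat : Int)) 1
      = PySem.List.pyRange (start + (k : Int) * cols) (start + (k : Int) * cols + cols) 1 := by
    rcases le_or_gt cols 0 with h | h
    · rw [PySem.List.pyRange_one_eq_nil (by omega), PySem.List.pyRange_one_eq_nil (by omega)]
    · have : (cols.toNat : Int) = cols := by omega
      rw [this]
  rw [hrow, PySem.Int.mod_eq_emod_of_pos (by omega : (0:Int) < 2)]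
  by_cases hpar : ((k : Int) % 2 = 0)
  · rw [if_pos hpar, fwd_run]
    apply List.map_congr_left
    intro j _
    rw [if_neg (by simpa using hpar)]
  · rw [if_neg hpar, rev_run]
    apply List.map_congr_left
    intro j _
    rw [if_pos (by simpa using hpar)]

-- Python's 'if c: u.append(x) else: u.append(y)' as an append of one conditional element.
lemma if_push {β : Type} (c : Prop) [Decidable c] (u : List β) (f g : β) :
    (if c then u ++ [f] else u ++ [g]) = u ++ [if c then f else g] := by
  split <;> rfl

-- ===== VERDICT (by name: the statement is the Claim_ definition above) =====
theorem create_zigzag_spec : Claim_equal_create_zigzag := by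
  intro rows cols start _
  show create_zigzag rows cols start = create_zigzag_alt rows cols start
  unfold create_zigzag create_zigzag_alt
  have hlen : ((PySem.List.pyRange 0 cols 1).length : Int) = (cols.toNat : Int) := by
    rw [PySem.List.length_pyRange_one]; omega
  simp only [innerFold, hlen, List.nil_append]
  simp only [outerFold, List.nil_append, if_push, PySem.List.foldl_append_singleton_eq_map]
  simp only [List.length_map, List.length_range]
  have hB : PySem.List.pyRange 0 rows 1
      = (List.range (PySem.List.pyRange 0 rows 1).length).map (fun (k : Nat) => (k : Int)) := by
    rw [PySem.List.length_pyRange_one, PySem.List.pyRange_one]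
    simp
  conv_rhs => rw [hB]
  rw [PySem.List.pyRange_zero_natCast]
  simp only [List.map_map]
  apply List.map_congr_left
  intro k hk
  simp only [List.mem_range] at hk
  simp only [Function.comp]
  rw [PySem.List.pyGetD_natCast, List.getD_eq_getElem _ _ (by simpa using hk)]
  simp only [List.getElem_map, List.getElem_range]
  exact row_eq cols start k
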